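-- pv_equiv track=rewrite | github.com/shreyas-londhe/paper2spec | scripts/expand_macros.py | parse_bracketed
-- ===== SOURCE A (Python) =====
-- from typing import Optional
--
-- def parse_bracketed(text: str, pos: int) -> tuple[Optional[str], int]:
--     """Parse an optional bracket-delimited group starting at pos.
--     Returns (content_or_None, position_after)."""
--     if pos >= len(text) or text[pos] != '[':
--         return None, pos
--     depth = 1
--     start = pos + 1
--     i = start
--     while i < len(text) and depth > 0:
--         if text[i] == '[':
--             depth += 1
--         elif text[i] == ']':
--             depth -= 1
--         i += 1
--     return text[start:i-1], i
-- ===== SOURCE B (Python) =====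
-- def parse_bracketed(text: str, pos: int):
--     """Parse an optional bracket-delimited group starting at pos.
--     Staged: first collect the (index, char) pairs of all brackets at or
--     after the content start, then walk only that bracket list with a
--     depth counter; the first bracket that brings the depth to 0 fixes the
--     end position, otherwise the group is unbalanced and ends at len(text).
--     A parse position is an index from the start, so a negative pos is
--     simply "no group here"."""
--     if pos < 0 or pos >= len(text) or text[pos] != '[':
--         return None, pos
--     start = pos + 1
--     brackets = [(j, ch) for j, ch in enumerate(text) if j >= start and (ch == '[' or ch == ']')]
--     depth = 1
--     end = len(text)
--     for j, ch in brackets: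
--         depth += 1 if ch == '[' else -1
--         if depth == 0:
--             end = j + 1
--             break
--     return text[start:end - 1], end
-- ===== Notes on version B (the rewrite author's own statement) =====
-- stated objective: alternative
-- what changed: B replaces A's single character-by-character depth-counting while-loop with two staged passes: it first builds the list of (index, char) pairs of the brackets after the start, then walks only that bracket list to find where the depth reaches 0; it also treats a negative pos as 'no group here' instead of Python's negative-index wraparound.
-- intended difference: On a negative in-range pos whose wrapped-around character is '[', A's negative-index wraparound parses a group relative to the end of the string and returns an accidental slice, while B returns (None, pos), the intended result for a parse position with no group at it. — e.g. on parse_bracketed("[", -1): A returns (some "", 1), B returns (none, -1)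
import Mathlib
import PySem

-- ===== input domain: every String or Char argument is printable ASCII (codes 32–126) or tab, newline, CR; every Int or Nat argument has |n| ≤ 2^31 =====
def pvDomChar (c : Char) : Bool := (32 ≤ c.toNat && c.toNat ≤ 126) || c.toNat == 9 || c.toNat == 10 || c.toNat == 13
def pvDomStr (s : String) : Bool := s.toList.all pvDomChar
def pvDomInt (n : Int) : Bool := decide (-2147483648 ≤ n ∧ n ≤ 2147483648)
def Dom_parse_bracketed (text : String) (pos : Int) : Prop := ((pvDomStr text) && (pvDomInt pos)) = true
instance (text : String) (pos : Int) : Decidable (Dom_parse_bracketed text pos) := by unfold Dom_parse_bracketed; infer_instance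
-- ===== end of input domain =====

-- B replaces A's char-by-char depth-counting while-loop by two staged passes (collect
-- the bracket (index, char) pairs after the start, then walk only that list), and
-- treats a negative pos as "no group here" (the intended difference is stated in D_).

-- ===== PORT A =====
-- the while loop of A: scan char by char, tracking depth; returns the final i.
-- The loop advances i by 1 while i < len, so the Int-valued loop is driven by the
-- exact fuel (len - i).toNat; at fuel 0 the guard i < len is false and the loop stops.
def pvAScanGo (cs : List Char) (depth i : Int) : Nat → Int
  | 0 => i
  | fuel+1 =>
    if i < (cs.length : Int) ∧ 0 < depth then
      let c := PySem.List.pyGet? cs i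
      let depth' := if c = some '[' then depth + 1 else if c = some ']' then depth - 1 else depth
      pvAScanGo cs depth' (i + 1) fuel
    else i

def pvAScan (cs : List Char) (depth i : Int) : Int :=
  pvAScanGo cs depth i ((cs.length : Int) - i).toNat

def parse_bracketed (text : String) (pos : Int) : Option String × Int :=
  let cs := text.toList
  if pos ≥ (cs.length : Int) ∨ PySem.List.pyGet? cs pos ≠ some '[' then (none, pos)
  else
    let start := pos + 1
    let i := pvAScan cs 1 start
    (some (String.ofList (PySem.List.slice cs (some start) (some (i - 1)))), i)

-- ===== PORT B =====
-- the for loop of B over the pre-built bracket list: adjust depth per bracket; the first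
-- bracket bringing it to 0 sets end = j + 1 and breaks, otherwise end stays len(text).
def pvWalk (len : Int) : Int → List (Int × Char) → Int
  | _, [] => len
  | depth, (j, c) :: rest =>
    let depth' := depth + (if c = '[' then 1 else -1)
    if depth' = 0 then j + 1 else pvWalk len depth' rest

def parse_bracketed_alt (text : String) (pos : Int) : Option String × Int :=
  let cs := text.toList
  if pos < 0 ∨ pos ≥ (cs.length : Int) ∨ PySem.List.pyGet? cs pos ≠ some '[' then (none, pos)
  else
    let start := pos + 1
    let brackets := (PySem.List.enumerate cs 0).filter
      (fun p => decide (start ≤ p.1) && (p.2 = '[' || p.2 = ']'))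
    let i := pvWalk (cs.length : Int) 1 brackets
    (some (String.ofList (PySem.List.slice cs (some start) (some (i - 1)))), i)

-- ===== PRECONDITION & SPEC =====
-- A raises IndexError exactly when pos < -len(text); only those inputs are excluded.
def Pre_parse_bracketed (text : String) (pos : Int) : Prop :=
  -(PySem.Str.len text) ≤ pos
instance (text : String) (pos : Int) : Decidable (Pre_parse_bracketed text pos) := by
  unfold Pre_parse_bracketed; infer_instance
def pvWitness_parse_bracketed : String × Int := ("a[b]c", 1)

-- On a negative in-range pos whose wrapped-around character is '[', A's negative-index
-- wraparound parses a group relative to the end of the string and returns an accidental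
-- slice, while B returns (None, pos), the intended result for a parse position with no
-- group at it.
def D_parse_bracketed (text : String) (pos : Int) : Prop :=
  pos < 0 ∧ PySem.Str.pyGet? text pos = some '['
instance (text : String) (pos : Int) : Decidable (D_parse_bracketed text pos) := by
  unfold D_parse_bracketed; infer_instance

def Spec_parse_bracketed (text : String) (pos : Int) (out : Option String × Int) : Prop :=
  ¬ D_parse_bracketed text pos → out = parse_bracketed_alt text pos
instance (text : String) (pos : Int) (out : Option String × Int) : Decidable (Spec_parse_bracketed text pos out) := by
  unfold Spec_parse_bracketed; infer_instance

def pvDiffWitness_parse_bracketed : String × Int := ("[", -1)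
def pvDiffWitnessOut_parse_bracketed : (Option String × Int) × (Option String × Int) :=
  ((some "", 1), (none, -1))

-- ===== CLAIM (what is proved, stated in full; the proofs are below) =====
def Claim_unchanged_parse_bracketed : Prop := ∀ (text : String) (pos : Int), Dom_parse_bracketed text pos → Pre_parse_bracketed text pos → Spec_parse_bracketed text pos (parse_bracketed text pos)
def Claim_changed_parse_bracketed : Prop := Dom_parse_bracketed (pvDiffWitness_parse_bracketed.1) (pvDiffWitness_parse_bracketed.2) ∧ Pre_parse_bracketed (pvDiffWitness_parse_bracketed.1) (pvDiffWitness_parse_bracketed.2) ∧ D_parse_bracketed (pvDiffWitness_parse_bracketed.1) (pvDiffWitness_parse_bracketed.2) ∧ parse_bracketed (pvDiffWitness_parse_bracketed.1) (pvDiffWitness_parse_bracketed.2) = pvDiffWitnessOut_parse_bracketed.1 ∧ parse_bracketed_alt (pvDiffWitness_parse_bracketed.1) (pvDiffWitness_parse_bracketed.2) = pvDiffWitnessOut_parse_bracketed.2 ∧ pvDiffWitnessOut_parse_bracketed.1 ≠ pvDiffWitnessOut_parse_bracketed.2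
def Claim_exact_parse_bracketed : Prop := ∀ (text : String) (pos : Int), Dom_parse_bracketed text pos → Pre_parse_bracketed text pos → D_parse_bracketed text pos → parse_bracketed text pos ≠ parse_bracketed_alt text pos

-- ===== LEMMAS AND PROOFS =====

-- B's bracket list restricted to indices ≥ k (exactly the port's filter expression).
def pvBracketsFrom (cs : List Char) (k : Int) : List (Int × Char) :=
  (PySem.List.enumerate cs 0).filter (fun p => decide (k ≤ p.1) && (p.2 = '[' || p.2 = ']'))

theorem pvBracketsFrom_drop (cs : List Char) (k : Nat) (hk : k ≤ cs.length) :
    pvBracketsFrom cs (k : Int) =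
      (PySem.List.enumerate (cs.drop k) (k : Int)).filter (fun p => p.2 = '[' || p.2 = ']') := by
  unfold pvBracketsFrom
  conv_lhs => rw [← List.take_append_drop k cs]
  rw [PySem.List.enumerate_append, List.filter_append]
  have h1 : (PySem.List.enumerate (cs.take k) 0).filter
      (fun p => decide ((k:Int) ≤ p.1) && (p.2 = '[' || p.2 = ']')) = [] := by
    rw [List.filter_eq_nil_iff]
    intro p hp
    obtain ⟨j, hj, rfl⟩ := (PySem.List.mem_enumerate_iff _ _ _).mp hp
    have hjk : j < k := lt_of_lt_of_le hj (by simp)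
    simp only [Bool.and_eq_true, decide_eq_true_eq, not_and]
    intro h
    omega
  have hlen : (cs.take k).length = k := List.length_take_of_le hk
  rw [h1, List.nil_append, hlen]
  have h2 : ∀ p ∈ PySem.List.enumerate (cs.drop k) ((0:Int) + k),
      (decide ((k:Int) ≤ p.1) && (p.2 = '[' || p.2 = ']')) = (p.2 = '[' || p.2 = ']') := by
    intro p hp
    obtain ⟨j, hj, rfl⟩ := (PySem.List.mem_enumerate_iff _ _ _).mp hp
    have : (k:Int) ≤ 0 + k + j := by omega
    rw [decide_eq_true this, Bool.true_and]
  rw [List.filter_congr h2]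
  norm_num

theorem pvBracketsFrom_len (cs : List Char) :
    pvBracketsFrom cs (cs.length : Int) = [] := by
  rw [pvBracketsFrom_drop cs cs.length le_rfl, List.drop_length]
  rfl

theorem pvBracketsFrom_step (cs : List Char) (k : Nat) (hk : k < cs.length) :
    pvBracketsFrom cs (k : Int) =
      (if cs[k] = '[' ∨ cs[k] = ']' then [((k : Int), cs[k])] else []) ++
        pvBracketsFrom cs ((k : Int) + 1) := by
  rw [pvBracketsFrom_drop cs k (le_of_lt hk)]
  have hdrop : cs.drop k = cs[k] :: cs.drop (k + 1) := List.drop_eq_getElem_cons hk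
  rw [hdrop, PySem.List.enumerate_cons, List.filter_cons]
  have hcast : ((k : Int) + 1) = ((k + 1 : Nat) : Int) := by push_cast; ring
  rw [hcast, ← pvBracketsFrom_drop cs (k+1) hk, ← hcast]
  by_cases hb : cs[k] = '[' ∨ cs[k] = ']'
  · rw [if_pos hb, if_pos (by simpa using hb)]
    rfl
  · rw [if_neg hb, if_neg (by simpa using hb)]
    rfl

theorem pvAScan_stop (cs : List Char) (d i : Int) (h : ¬(i < (cs.length:Int) ∧ 0 < d)) :
    pvAScan cs d i = i := by
  unfold pvAScan
  cases hf : ((cs.length : Int) - i).toNat with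
  | zero => rfl
  | succ f => simp only [pvAScanGo]; rw [if_neg h]

theorem pvAScan_step (cs : List Char) (d : Int) (k : Nat) (hk : k < cs.length) (hd : 0 < d) :
    pvAScan cs d (k : Int) =
      pvAScan cs (if cs[k]? = some '[' then d + 1 else if cs[k]? = some ']' then d - 1 else d)
        ((k : Int) + 1) := by
  unfold pvAScan
  have hm : ((cs.length:Int) - (k:Int)).toNat = ((cs.length:Int) - ((k:Int)+1)).toNat + 1 := by
    omega
  rw [hm]
  simp only [pvAScanGo]
  rw [if_pos ⟨by exact_mod_cast hk, hd⟩]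
  simp only [PySem.List.pyGet?_natCast]

theorem pvScan_eq_walk (cs : List Char) :
    ∀ (n k : Nat) (d : Int), cs.length - k ≤ n → k ≤ cs.length → 0 < d →
      pvAScan cs d (k : Int) = pvWalk (cs.length : Int) d (pvBracketsFrom cs (k : Int)) := by
  intro n
  induction n with
  | zero =>
    intro k d h1 h2 hd
    have hk : k = cs.length := by omega
    subst hk
    rw [pvBracketsFrom_len, pvAScan_stop _ _ _ (by omega)]
    rfl
  | succ n ih =>
    intro k d h1 h2 hd
    rcases Nat.eq_or_lt_of_le h2 with he | hlt
    · subst he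
      rw [pvBracketsFrom_len, pvAScan_stop _ _ _ (by omega)]
      rfl
    · have hget : cs[k]? = some cs[k] := List.getElem?_eq_getElem hlt
      have hcast : ((k : Int) + 1) = ((k + 1 : Nat) : Int) := by push_cast; ring
      rw [pvAScan_step cs d k hlt hd, pvBracketsFrom_step cs k hlt, hget]
      by_cases hop : cs[k] = '['
      · rw [if_pos (by rw [hop]), if_pos (Or.inl hop), List.singleton_append]
        simp only [pvWalk, hop, if_true]
        rw [if_neg (by omega : ¬ d + 1 = 0), hcast]
        exact ih (k+1) (d+1) (by omega) (by omega) (by omega)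
      · rw [if_neg (by simpa [Option.some_inj] using hop)]
        by_cases hcl : cs[k] = ']'
        · rw [if_pos (by rw [hcl]), if_pos (Or.inr hcl), List.singleton_append]
          simp only [pvWalk, hcl]
          rw [show (if (']':Char) = '[' then (1:Int) else -1) = -1 from by decide]
          by_cases hd1 : d = 1
          · rw [if_pos (by omega : d + -1 = 0), hd1]
            exact pvAScan_stop cs 0 ((k:Int)+1) (by omega)
          · rw [if_neg (by omega : ¬ d + -1 = 0), hcast]
            have : d + -1 = d - 1 := by ring
            rw [this]
            exact ih (k+1) (d-1) (by omega) (by omega) (by omega)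
        · rw [if_neg (by simpa [Option.some_inj] using hcl),
            if_neg (by tauto), List.nil_append, hcast]
          exact ih (k+1) d (by omega) (by omega) hd

theorem pvScan_eq (cs : List Char) (k : Nat) (h2 : k ≤ cs.length) :
    pvAScan cs 1 (k : Int) = pvWalk (cs.length : Int) 1 (pvBracketsFrom cs (k : Int)) :=
  pvScan_eq_walk cs cs.length k 1 (by omega) h2 (by omega)

-- ===== VERDICT (by name: the statement is the Claim_ definition above) =====
theorem parse_bracketed_spec : Claim_unchanged_parse_bracketed := by
  intro text pos hdom hpre hnd
  by_cases hneg : pos < 0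
  · have hch : PySem.List.pyGet? text.toList pos ≠ some '[' := by
      intro h
      exact hnd ⟨hneg, by simpa [PySem.Str.pyGet?_eq] using h⟩
    simp only [parse_bracketed, parse_bracketed_alt]
    rw [if_pos (Or.inr hch), if_pos (Or.inl hneg)]
  · obtain ⟨p, rfl⟩ := Int.eq_ofNat_of_zero_le (not_lt.mp hneg)
    by_cases hg : ((p:Int) ≥ (text.toList.length : Int) ∨
        PySem.List.pyGet? text.toList (p:Int) ≠ some '[')
    · simp only [parse_bracketed, parse_bracketed_alt]
      rw [if_pos hg, if_pos (Or.inr hg)]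
    · have h1 := (not_or.mp hg).1
      simp only [parse_bracketed, parse_bracketed_alt]
      rw [if_neg hg, if_neg (fun h => h.elim (fun h0 => absurd h0 (by omega)) hg)]
      have hscan : pvAScan text.toList 1 ((p:Int)+1) =
          pvWalk (text.toList.length : Int) 1 (pvBracketsFrom text.toList ((p:Int)+1)) := by
        have hcast : ((p:Int)+1) = ((p+1 : Nat) : Int) := by push_cast; ring
        rw [hcast]
        exact pvScan_eq text.toList (p+1) (by omega)
      rw [hscan]
      rfl

theorem parse_bracketed_changed : Claim_changed_parse_bracketed := by
  unfold Claim_changed_parse_bracketed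
  decide

theorem parse_bracketed_tight : Claim_exact_parse_bracketed := by
  intro text pos hdom hpre hd heq
  obtain ⟨hneg, hch⟩ := hd
  have hB : parse_bracketed_alt text pos = (none, pos) := by
    simp only [parse_bracketed_alt]
    rw [if_pos (Or.inl hneg)]
  have hch' : PySem.List.pyGet? text.toList pos = some '[' := by
    simpa [PySem.Str.pyGet?_eq] using hch
  have hlen : ¬ pos ≥ (text.toList.length : Int) := by
    have : (0:Int) ≤ (text.toList.length : Int) := Int.natCast_nonneg _
    omega
  have hA : parse_bracketed text pos =
      (some (String.ofList (PySem.List.slice text.toList (some (pos+1))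
        (some (pvAScan text.toList 1 (pos+1) - 1)))), pvAScan text.toList 1 (pos+1)) := by
    simp only [parse_bracketed]
    rw [if_neg (fun h => h.elim hlen (fun h2 => h2 hch'))]
  rw [hA, hB] at heq
  simp only [Prod.mk.injEq] at heq
  exact Option.some_ne_none _ heq.1
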